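-- pv_equiv track=rewrite | github.com/vanavreddy/Evaluating_Generative_Methods_Calorimeter_Shower | evaluation_codes/morans_I.py | create_custom_weight_matrix
-- ===== SOURCE A (Python) =====
-- def create_custom_weight_matrix(nrows, ncols):
--     weights = {}
--     for row in range(nrows):
--         for col in range(ncols):
--             index = row * ncols + col
--             neighbors = []
--
--             # Previous row
--             prev_row = (row - 1) % nrows
--             neighbors.append(prev_row * ncols + col)
--
--             # Next row
--             next_row = (row + 1) % nrows
--             neighbors.append(next_row * ncols + col)
--
--             # Previous column
--             if col > 0:
--                 neighbors.append(row * ncols + (col - 1))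
--
--             # Next column
--             if col < ncols - 1:
--                 neighbors.append(row * ncols + (col + 1))
--
--             # Construct the dictionary for the current cell
--             weights[index] = {neighbor: 1 for neighbor in neighbors}
--
--     return weights
-- ===== SOURCE B (Python) =====
-- def create_custom_weight_matrix(nrows, ncols):
--     weights = {}
--     # stage 1: every cell starts with its two (toroidal) vertical neighbours
--     for row in range(nrows):
--         up = ((row - 1) % nrows) * ncols
--         down = ((row + 1) % nrows) * ncols
--         for col in range(ncols):
--             weights[row * ncols + col] = {up + col: 1, down + col: 1}
--     # stage 2: add each horizontal undirected edge once, symmetrically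
--     for row in range(nrows):
--         for col in range(ncols - 1):
--             left = row * ncols + col
--             weights[left][left + 1] = 1
--             weights[left + 1][left] = 1
--     return weights
-- ===== Notes on version B (the rewrite author's own statement) =====
-- stated objective: alternative
-- what changed: Instead of recomputing all four neighbours per cell in one pass, B builds the graph in two staged passes: first every cell gets only its toroidal vertical neighbours, then each horizontal undirected edge is added once and symmetrically (weights[left][right]=1 and weights[right][left]=1) with no per-cell boundary branches.
import Mathlib
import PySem

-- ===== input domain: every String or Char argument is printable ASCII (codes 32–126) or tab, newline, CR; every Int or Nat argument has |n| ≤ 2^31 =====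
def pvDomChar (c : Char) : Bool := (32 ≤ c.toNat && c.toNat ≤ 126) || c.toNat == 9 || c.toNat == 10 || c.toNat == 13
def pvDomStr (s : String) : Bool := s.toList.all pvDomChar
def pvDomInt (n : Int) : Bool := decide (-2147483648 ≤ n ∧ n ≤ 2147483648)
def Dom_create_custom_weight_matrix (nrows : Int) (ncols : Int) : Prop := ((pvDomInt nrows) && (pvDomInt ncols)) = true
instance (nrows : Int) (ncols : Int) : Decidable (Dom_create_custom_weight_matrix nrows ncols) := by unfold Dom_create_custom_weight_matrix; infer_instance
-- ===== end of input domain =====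

-- B builds the graph in two staged passes — vertical (toroidal) neighbours per cell, then
-- each horizontal undirected edge added once and symmetrically — instead of A's single pass
-- recomputing all four neighbours per cell; objective: alternative (same cost).

-- ===== PORT A =====
def create_custom_weight_matrix (nrows : Int) (ncols : Int) : List (Int × List (Int × Int)) :=
  ((PySem.List.pyRange 0 nrows 1).foldl (fun weights row =>
    (PySem.List.pyRange 0 ncols 1).foldl (fun weights col =>
      let index := row * ncols + col
      let neighbors : List Int := []
      let prev_row := PySem.Int.mod (row - 1) nrows
      let neighbors := neighbors ++ [prev_row * ncols + col]
      let next_row := PySem.Int.mod (row + 1) nrows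
      let neighbors := neighbors ++ [next_row * ncols + col]
      let neighbors := if 0 < col then neighbors ++ [row * ncols + (col - 1)] else neighbors
      let neighbors := if col < ncols - 1 then neighbors ++ [row * ncols + (col + 1)] else neighbors
      weights.insert index
        (neighbors.foldl (fun d n => d.insert n (1 : Int)) PySem.Dict.empty).items)
      weights)
    (PySem.Dict.empty : PySem.Dict Int (List (Int × Int)))).items

-- ===== PORT B =====
-- stage 2's `weights[left][left+1] = 1` is ported as Dict.modify with default empty: exact
-- here because stage 1 has already inserted every key that stage 2 touches.
def create_custom_weight_matrix_alt (nrows : Int) (ncols : Int) : List (Int × List (Int × Int)) :=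
  let weights : PySem.Dict Int (PySem.Dict Int Int) :=
    (PySem.List.pyRange 0 nrows 1).foldl (fun w row =>
      let up := PySem.Int.mod (row - 1) nrows * ncols
      let down := PySem.Int.mod (row + 1) nrows * ncols
      (PySem.List.pyRange 0 ncols 1).foldl (fun w col =>
        w.insert (row * ncols + col)
          ((PySem.Dict.empty.insert (up + col) 1).insert (down + col) 1)) w)
      PySem.Dict.empty
  let weights :=
    (PySem.List.pyRange 0 nrows 1).foldl (fun w row =>
      (PySem.List.pyRange 0 (ncols - 1) 1).foldl (fun w col =>
        let left := row * ncols + col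
        let w := w.modify left PySem.Dict.empty (fun d => d.insert (left + 1) 1)
        w.modify (left + 1) PySem.Dict.empty (fun d => d.insert left 1)) w) weights
  weights.items.map (fun p => (p.1, p.2.items))

-- ===== PRECONDITION & SPEC =====
def Spec_create_custom_weight_matrix (nrows : Int) (ncols : Int) (out : List (Int × List (Int × Int))) : Prop := out = create_custom_weight_matrix_alt nrows ncols
instance (nrows : Int) (ncols : Int) (out : List (Int × List (Int × Int))) : Decidable (Spec_create_custom_weight_matrix nrows ncols out) := by unfold Spec_create_custom_weight_matrix; infer_instance

-- ===== CLAIM (what is proved, stated in full; the proofs are below) =====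
def Claim_equal_create_custom_weight_matrix : Prop := ∀ (nrows : Int) (ncols : Int), Dom_create_custom_weight_matrix nrows ncols → Spec_create_custom_weight_matrix nrows ncols (create_custom_weight_matrix nrows ncols)

-- ===== LEMMAS AND PROOFS =====

-- ---- shared arithmetic facts ----
theorem pvKeyInj {ncols r1 c1 r2 c2 : Int} (hc : 0 < ncols)
    (h1 : 0 ≤ c1) (h1' : c1 < ncols) (h2 : 0 ≤ c2) (h2' : c2 < ncols)
    (h : r1 * ncols + c1 = r2 * ncols + c2) : r1 = r2 ∧ c1 = c2 := by
  have e1 : (r1 * ncols + c1) % ncols = c1 := by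
    rw [add_comm, mul_comm, Int.add_mul_emod_self_left]
    exact Int.emod_eq_of_lt h1 h1'
  have e2 : (r2 * ncols + c2) % ncols = c2 := by
    rw [add_comm, mul_comm, Int.add_mul_emod_self_left]
    exact Int.emod_eq_of_lt h2 h2'
  have hcc : c1 = c2 := by rw [← e1, ← e2, h]
  refine ⟨?_, hcc⟩
  have : r1 * ncols = r2 * ncols := by omega
  exact mul_right_cancel₀ (by omega) this

theorem pvVert {nrows row : Int} (hn : 0 < nrows) :
    PySem.Int.mod (row + 1) nrows = PySem.Int.mod (row - 1) nrows ↔ nrows ≤ 2 := by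
  rw [PySem.Int.mod_eq_emod_of_pos hn, PySem.Int.mod_eq_emod_of_pos hn,
    Int.emod_eq_emod_iff_emod_sub_eq_zero]
  have he : row + 1 - (row - 1) = 2 := by ring
  rw [he]
  constructor
  · intro h
    by_contra hgt
    rw [Int.emod_eq_of_lt (by omega) (by omega)] at h
    omega
  · intro h
    interval_cases nrows <;> decide

theorem pvDivMod {ncols row col : Int} (hc : 0 < ncols) (h1 : 0 ≤ col) (h2 : col < ncols) :
    PySem.Int.floordiv (row * ncols + col) ncols = row ∧
    PySem.Int.mod (row * ncols + col) ncols = col := by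
  constructor
  · rw [PySem.Int.floordiv_eq_iff_of_pos hc]
    constructor
    · linarith
    · have : (row + 1) * ncols = row * ncols + ncols := by ring
      linarith [this]
  · rw [PySem.Int.mod_eq_emod_of_pos hc, add_comm, mul_comm, Int.add_mul_emod_self_left]
    exact Int.emod_eq_of_lt h1 h2

theorem pvModBounds {a b : Int} (hb : 0 < b) : 0 ≤ PySem.Int.mod a b ∧ PySem.Int.mod a b < b := by
  rw [PySem.Int.mod_eq_emod_of_pos hb]
  exact ⟨Int.emod_nonneg a (by omega), Int.emod_lt_of_pos a hb⟩

-- the common cell description both sides are reduced to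
def pvCellRC (nrows ncols row col : Int) : List (Int × Int) :=
  [(PySem.Int.mod (row - 1) nrows * ncols + col, 1)]
  ++ (if 2 < nrows then [(PySem.Int.mod (row + 1) nrows * ncols + col, 1)] else [])
  ++ (if 0 < col then [(row * ncols + col - 1, 1)] else [])
  ++ (if col < ncols - 1 then [(row * ncols + col + 1, 1)] else [])

def pvCell (nrows ncols i : Int) : List (Int × Int) :=
  let row := PySem.Int.floordiv i ncols
  let col := PySem.Int.mod i ncols
  [(PySem.Int.mod (row - 1) nrows * ncols + col, 1)]
  ++ (if 2 < nrows then [(PySem.Int.mod (row + 1) nrows * ncols + col, 1)] else [])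
  ++ (if 0 < col then [(i - 1, 1)] else [])
  ++ (if col < ncols - 1 then [(i + 1, 1)] else [])

theorem pvCell_eq {nrows ncols row col : Int} (hc : 0 < ncols) (h1 : 0 ≤ col) (h2 : col < ncols) :
    pvCell nrows ncols (row * ncols + col) = pvCellRC nrows ncols row col := by
  obtain ⟨hd, hm⟩ := pvDivMod (row := row) hc h1 h2
  simp only [pvCell, pvCellRC, hd, hm]

theorem pvNodupRC {nrows ncols row col : Int} (hn : 0 < nrows) (hc : 0 < ncols)
    (h1 : 0 ≤ col) (h2 : col < ncols) :
    ((pvCellRC nrows ncols row col).map (·.1)).Nodup := by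
  obtain ⟨hp1, hp2⟩ := pvModBounds (a := row - 1) hn
  obtain ⟨hq1, hq2⟩ := pvModBounds (a := row + 1) hn
  have hvv : 2 < nrows → PySem.Int.mod (row - 1) nrows * ncols + col ≠
      PySem.Int.mod (row + 1) nrows * ncols + col := by
    intro h3 he
    have := (pvKeyInj hc h1 h2 h1 h2 he).1
    have := (pvVert (row := row) hn).mp this.symm
    omega
  have hkl : ∀ r' : Int, 0 < col → r' * ncols + col ≠ row * ncols + col - 1 := by
    intro r' hcl he
    have he' : r' * ncols + col = row * ncols + (col - 1) := by omega
    have := (pvKeyInj hc h1 h2 (by omega) (by omega) he').2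
    omega
  have hkr : ∀ r' : Int, col < ncols - 1 → r' * ncols + col ≠ row * ncols + col + 1 := by
    intro r' hcl he
    have he' : r' * ncols + col = row * ncols + (col + 1) := by omega
    have := (pvKeyInj hc h1 h2 (by omega) (by omega) he').2
    omega
  have hlr : 0 < col → col < ncols - 1 → row * ncols + col - 1 ≠ row * ncols + col + 1 := by
    intro _ _; omega
  unfold pvCellRC
  split_ifs with hA hB hC hB' hC' hC'' hC''' <;>
    simp_all [List.nodup_cons, List.Nodup] <;> try tauto

theorem pvFoldKeys (l : List Int) (h : l.Nodup) :
    (l.foldl (fun d n => d.insert n (1 : Int)) (PySem.Dict.empty : PySem.Dict Int Int)).items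
      = l.map (fun n => (n, 1)) := by
  have := PySem.Dict.items_foldl_insert_fresh l (fun n => n) (fun _ => (1 : Int))
    (PySem.Dict.empty : PySem.Dict Int Int)
    (fun a _ => PySem.Dict.contains_empty a) (by simpa using h)
  simpa using this

-- ---- A side ----
theorem pvCellA_items {nrows ncols row col : Int} (hn : 0 < nrows) (hc : 0 < ncols)
    (hr1 : 0 ≤ row) (hr2 : row < nrows) (h1 : 0 ≤ col) (h2 : col < ncols) :
    (((if col < ncols - 1 then
        (if 0 < col then
          ([] ++ [PySem.Int.mod (row - 1) nrows * ncols + col]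
              ++ [PySem.Int.mod (row + 1) nrows * ncols + col])
            ++ [row * ncols + (col - 1)]
         else
          [] ++ [PySem.Int.mod (row - 1) nrows * ncols + col]
              ++ [PySem.Int.mod (row + 1) nrows * ncols + col])
          ++ [row * ncols + (col + 1)]
       else
        (if 0 < col then
          ([] ++ [PySem.Int.mod (row - 1) nrows * ncols + col]
              ++ [PySem.Int.mod (row + 1) nrows * ncols + col])
            ++ [row * ncols + (col - 1)]
         else
          [] ++ [PySem.Int.mod (row - 1) nrows * ncols + col]
              ++ [PySem.Int.mod (row + 1) nrows * ncols + col])).foldl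
        (fun d n => d.insert n (1 : Int)) (PySem.Dict.empty : PySem.Dict Int Int)).items)
      = pvCellRC nrows ncols row col := by
  have hnd := pvNodupRC (row := row) hn hc h1 h2
  by_cases hA : 2 < nrows
  · have hkeys : (if col < ncols - 1 then
        (if 0 < col then
          ([] ++ [PySem.Int.mod (row - 1) nrows * ncols + col]
              ++ [PySem.Int.mod (row + 1) nrows * ncols + col]) ++ [row * ncols + (col - 1)]
         else [] ++ [PySem.Int.mod (row - 1) nrows * ncols + col]
              ++ [PySem.Int.mod (row + 1) nrows * ncols + col]) ++ [row * ncols + (col + 1)]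
       else
        (if 0 < col then
          ([] ++ [PySem.Int.mod (row - 1) nrows * ncols + col]
              ++ [PySem.Int.mod (row + 1) nrows * ncols + col]) ++ [row * ncols + (col - 1)]
         else [] ++ [PySem.Int.mod (row - 1) nrows * ncols + col]
              ++ [PySem.Int.mod (row + 1) nrows * ncols + col]))
      = (pvCellRC nrows ncols row col).map (·.1) := by
      simp only [pvCellRC, hA, if_true]
      split_ifs <;> simp <;> ring_nf <;> simp [add_sub_assoc]
    rw [hkeys, pvFoldKeys _ (by simpa using hnd)]
    simp only [pvCellRC]
    split_ifs <;> simp [hA]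
  · have hv : PySem.Int.mod (row + 1) nrows = PySem.Int.mod (row - 1) nrows :=
      (pvVert hn).mpr (by omega)
    have hv1l : 0 < col → PySem.Int.mod (row - 1) nrows * ncols + col ≠ row * ncols + (col - 1) := by
      intro hcl he
      have := (pvKeyInj hc h1 h2 (by omega) (by omega) he).2
      omega
    have hv1r : col < ncols - 1 → PySem.Int.mod (row - 1) nrows * ncols + col ≠ row * ncols + (col + 1) := by
      intro hcr he
      have := (pvKeyInj hc h1 h2 (by omega) (by omega) he).2
      omega
    rw [hv]
    split_ifs with hcr hcl hcl
    · have hfk := pvFoldKeys [PySem.Int.mod (row - 1) nrows * ncols + col,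
        row * ncols + (col - 1), row * ncols + (col + 1)]
        (by simp [hv1l hcl, hv1r hcr]; omega)
      simp only [List.foldl_cons, List.foldl_nil] at hfk
      simp only [List.nil_append, List.cons_append, List.foldl_cons, List.foldl_nil,
        PySem.Dict.insert_insert_self]
      rw [hfk]
      simp [pvCellRC, hA, hcl, hcr, add_sub_assoc, add_assoc]
    · have hfk := pvFoldKeys [PySem.Int.mod (row - 1) nrows * ncols + col,
        row * ncols + (col + 1)] (by simp [hv1r hcr])
      simp only [List.foldl_cons, List.foldl_nil] at hfk
      simp only [List.nil_append, List.cons_append, List.foldl_cons, List.foldl_nil,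
        PySem.Dict.insert_insert_self]
      rw [hfk]
      simp [pvCellRC, hA, hcl, hcr, add_sub_assoc, add_assoc]
    · have hfk := pvFoldKeys [PySem.Int.mod (row - 1) nrows * ncols + col,
        row * ncols + (col - 1)] (by simp [hv1l hcl])
      simp only [List.foldl_cons, List.foldl_nil] at hfk
      simp only [List.nil_append, List.cons_append, List.foldl_cons, List.foldl_nil,
        PySem.Dict.insert_insert_self]
      rw [hfk]
      simp [pvCellRC, hA, hcl, hcr, add_sub_assoc, add_assoc]
    · have hfk := pvFoldKeys [PySem.Int.mod (row - 1) nrows * ncols + col] (by simp)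
      simp only [List.foldl_cons, List.foldl_nil] at hfk
      simp only [List.nil_append, List.cons_append, List.foldl_cons, List.foldl_nil,
        PySem.Dict.insert_insert_self]
      rw [hfk]
      simp [pvCellRC, hA, hcl, hcr, add_sub_assoc, add_assoc]

theorem pvRowFold {nrows ncols : Int} (hc : 0 < ncols) (row : Int)
    (hr1 : 0 ≤ row) (hr2 : row < nrows) (D : PySem.Dict Int (List (Int × Int)))
    (hD : D.items = (PySem.List.pyRange 0 (row * ncols)).map (fun i => (i, pvCell nrows ncols i))) :
    ((PySem.List.pyRange 0 ncols).foldl (fun weights col =>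
      let index := row * ncols + col
      let neighbors : List Int := []
      let prev_row := PySem.Int.mod (row - 1) nrows
      let neighbors := neighbors ++ [prev_row * ncols + col]
      let next_row := PySem.Int.mod (row + 1) nrows
      let neighbors := neighbors ++ [next_row * ncols + col]
      let neighbors := if 0 < col then neighbors ++ [row * ncols + (col - 1)] else neighbors
      let neighbors := if col < ncols - 1 then neighbors ++ [row * ncols + (col + 1)] else neighbors
      weights.insert index
        (neighbors.foldl (fun d n => d.insert n (1 : Int)) PySem.Dict.empty).items) D).items
    = (PySem.List.pyRange 0 ((row + 1) * ncols)).map (fun i => (i, pvCell nrows ncols i)) := by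
  have hn : 0 < nrows := by omega
  have hrc0 : 0 ≤ row * ncols := mul_nonneg hr1 (by omega)
  have hrc1 : (row + 1) * ncols = row * ncols + ncols := by ring
  have h := PySem.Dict.items_foldl_insert_fresh (PySem.List.pyRange 0 ncols)
    (fun col => row * ncols + col)
    (fun col =>
      ((if col < ncols - 1 then
          (if 0 < col then
            ([] ++ [PySem.Int.mod (row - 1) nrows * ncols + col]
                ++ [PySem.Int.mod (row + 1) nrows * ncols + col]) ++ [row * ncols + (col - 1)]
           else [] ++ [PySem.Int.mod (row - 1) nrows * ncols + col]
                ++ [PySem.Int.mod (row + 1) nrows * ncols + col]) ++ [row * ncols + (col + 1)]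
         else
          (if 0 < col then
            ([] ++ [PySem.Int.mod (row - 1) nrows * ncols + col]
                ++ [PySem.Int.mod (row + 1) nrows * ncols + col]) ++ [row * ncols + (col - 1)]
           else [] ++ [PySem.Int.mod (row - 1) nrows * ncols + col]
                ++ [PySem.Int.mod (row + 1) nrows * ncols + col])).foldl
        (fun d n => d.insert n (1 : Int)) PySem.Dict.empty).items)
    D
    (by
      intro a ha
      obtain ⟨ha0, ha1⟩ := PySem.List.mem_pyRange_one.mp ha
      rw [PySem.Dict.contains_eq_decide_mem_keys]
      simp only [PySem.Dict.keys, hD, List.map_map]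
      rw [decide_eq_false_iff_not]
      intro hmem
      simp only [List.mem_map] at hmem
      obtain ⟨x, hx, hx2⟩ := hmem
      obtain ⟨hx0, hx1⟩ := PySem.List.mem_pyRange_one.mp hx
      simp only [Function.comp] at hx2
      have : x = row * ncols + a := hx2
      omega)
    ((PySem.List.nodup_pyRange_one 0 ncols).map (add_right_injective (row * ncols)))
  simp only [] at h
  rw [h, hD]
  rw [PySem.List.pyRange_one_append 0 (row * ncols) ((row + 1) * ncols) hrc0 (by omega),
    List.map_append]
  congr 1
  rw [hrc1, PySem.List.pyRange_one, PySem.List.pyRange_one]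
  simp only [List.map_map, add_sub_cancel_left, sub_zero]
  apply List.map_congr_left
  intro k hk
  have hk' : (k : Int) < ncols := by
    have := List.mem_range.mp hk
    omega
  have hk0 : (0 : Int) ≤ (k : Int) := Int.natCast_nonneg k
  simp only [Function.comp, zero_add]
  have := pvCellA_items (nrows := nrows) (ncols := ncols) (row := row) (col := (k : Int))
    hn hc hr1 hr2 hk0 hk'
  rw [this, ← pvCell_eq hc hk0 hk']

theorem pvFoldlConst {α β : Type} (l : List β) (d : α) : l.foldl (fun w _ => w) d = d := by
  induction l generalizing d with
  | nil => rfl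
  | cons x xs ih => simpa using ih d

theorem pvA_fold {nrows ncols : Int} (hc : 0 < ncols) (m : Nat) (hm : (m : Int) ≤ nrows) :
    ((PySem.List.pyRange 0 (m : Int)).foldl (fun weights row =>
      (PySem.List.pyRange 0 ncols).foldl (fun weights col =>
        let index := row * ncols + col
        let neighbors : List Int := []
        let prev_row := PySem.Int.mod (row - 1) nrows
        let neighbors := neighbors ++ [prev_row * ncols + col]
        let next_row := PySem.Int.mod (row + 1) nrows
        let neighbors := neighbors ++ [next_row * ncols + col]
        let neighbors := if 0 < col then neighbors ++ [row * ncols + (col - 1)] else neighbors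
        let neighbors := if col < ncols - 1 then neighbors ++ [row * ncols + (col + 1)] else neighbors
        weights.insert index
          (neighbors.foldl (fun d n => d.insert n (1 : Int)) PySem.Dict.empty).items)
        weights)
      (PySem.Dict.empty : PySem.Dict Int (List (Int × Int)))).items
    = (PySem.List.pyRange 0 ((m : Int) * ncols)).map (fun i => (i, pvCell nrows ncols i)) := by
  induction m with
  | zero =>
    rw [show ((0 : Nat) : Int) = 0 from rfl, PySem.List.pyRange_one_eq_nil (le_refl 0),
      show ((0 : Int) * ncols) = 0 from by ring, PySem.List.pyRange_one_eq_nil (le_refl 0)]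
    rfl
  | succ m ih =>
    have hm' : (m : Int) ≤ nrows := by push_cast at hm ⊢; omega
    have hcast : ((m + 1 : Nat) : Int) = (m : Int) + 1 := by push_cast; ring
    rw [hcast, PySem.List.pyRange_one_succ_right (Int.natCast_nonneg m), List.foldl_append,
      List.foldl_cons, List.foldl_nil]
    exact pvRowFold hc (m : Int) (Int.natCast_nonneg m) (by push_cast at hm; omega) _ (ih hm')

theorem pvA_eq {nrows ncols : Int} (hn : 0 < nrows) (hc : 0 < ncols) :
    create_custom_weight_matrix nrows ncols
      = (PySem.List.pyRange 0 (nrows * ncols)).map (fun i => (i, pvCell nrows ncols i)) := by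
  unfold create_custom_weight_matrix
  have h := pvA_fold (nrows := nrows) hc nrows.toNat
    (by rw [Int.toNat_of_nonneg hn.le])
  rw [Int.toNat_of_nonneg hn.le] at h
  exact h

-- ---- B side ----
-- vertical-only cell contents after stage 1
def pvVDict (nrows ncols i : Int) : PySem.Dict Int Int :=
  (PySem.Dict.empty.insert
      (PySem.Int.mod (PySem.Int.floordiv i ncols - 1) nrows * ncols + PySem.Int.mod i ncols) 1).insert
    (PySem.Int.mod (PySem.Int.floordiv i ncols + 1) nrows * ncols + PySem.Int.mod i ncols) 1

-- cell contents of cell i after every horizontal edge with left endpoint < b has been added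
def pvCellStage (nrows ncols b i : Int) : PySem.Dict Int Int :=
  let j := PySem.Int.mod i ncols
  let d := pvVDict nrows ncols i
  let d := if 0 < j ∧ i - 1 < b then d.insert (i - 1) 1 else d
  if i < b ∧ j < ncols - 1 then d.insert (i + 1) 1 else d

theorem pvItemsModify {R : List Int} {F : Int → PySem.Dict Int Int}
    {W : PySem.Dict Int (PySem.Dict Int Int)}
    (hW : W.items = R.map (fun i => (i, F i))) (hnd : R.Nodup) {k : Int} (hk : k ∈ R)
    (g : PySem.Dict Int Int → PySem.Dict Int Int) :
    (W.modify k PySem.Dict.empty g).items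
      = R.map (fun i => (i, if i = k then g (F i) else F i)) := by
  have hkeys : W.keys = R := by
    simp only [PySem.Dict.keys, hW, List.map_map]
    have : ((fun x : Int × PySem.Dict Int Int => x.1) ∘ fun i => (i, F i)) = id := rfl
    rw [this, List.map_id]
  have hknd : W.keys.Nodup := by rw [hkeys]; exact hnd
  have hmem : (k, F k) ∈ W.items := by
    rw [hW]; exact List.mem_map_of_mem hk
  have hget : W.getD k PySem.Dict.empty = F k :=
    PySem.Dict.getD_of_mem_items W hmem hknd PySem.Dict.empty
  have hcont : W.contains k = true := by
    rw [PySem.Dict.contains_eq_decide_mem_keys, hkeys]; exact decide_eq_true hk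
  show (W.insert k (g (W.getD k PySem.Dict.empty))).items = _
  rw [hget, PySem.Dict.items_insert_of_contains W _ hcont, hW, List.map_map]
  apply List.map_congr_left
  intro i _
  simp only [Function.comp]
  by_cases h : i = k
  · subst h; simp
  · simp [h]

-- stage 1, one row
theorem pvS1Row {nrows ncols : Int} (hc : 0 < ncols) (row : Int)
    (hr1 : 0 ≤ row) (hr2 : row < nrows) (D : PySem.Dict Int (PySem.Dict Int Int))
    (hD : D.items = (PySem.List.pyRange 0 (row * ncols)).map (fun i => (i, pvVDict nrows ncols i))) :
    ((PySem.List.pyRange 0 ncols).foldl (fun w col =>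
        w.insert (row * ncols + col)
          ((PySem.Dict.empty.insert (PySem.Int.mod (row - 1) nrows * ncols + col) 1).insert
            (PySem.Int.mod (row + 1) nrows * ncols + col) 1)) D).items
      = (PySem.List.pyRange 0 ((row + 1) * ncols)).map (fun i => (i, pvVDict nrows ncols i)) := by
  have hrc0 : 0 ≤ row * ncols := mul_nonneg hr1 (by omega)
  have hrc1 : (row + 1) * ncols = row * ncols + ncols := by ring
  have h := PySem.Dict.items_foldl_insert_fresh (PySem.List.pyRange 0 ncols)
    (fun col => row * ncols + col)
    (fun col =>
      (PySem.Dict.empty.insert (PySem.Int.mod (row - 1) nrows * ncols + col) 1).insert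
        (PySem.Int.mod (row + 1) nrows * ncols + col) 1)
    D
    (by
      intro a ha
      obtain ⟨ha0, ha1⟩ := PySem.List.mem_pyRange_one.mp ha
      rw [PySem.Dict.contains_eq_decide_mem_keys]
      simp only [PySem.Dict.keys, hD, List.map_map]
      rw [decide_eq_false_iff_not]
      intro hmem
      simp only [List.mem_map] at hmem
      obtain ⟨x, hx, hx2⟩ := hmem
      obtain ⟨hx0, hx1⟩ := PySem.List.mem_pyRange_one.mp hx
      simp only [Function.comp] at hx2
      have : x = row * ncols + a := hx2
      omega)
    ((PySem.List.nodup_pyRange_one 0 ncols).map (add_right_injective (row * ncols)))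
  rw [h, hD]
  rw [PySem.List.pyRange_one_append 0 (row * ncols) ((row + 1) * ncols) hrc0 (by omega),
    List.map_append]
  congr 1
  rw [hrc1, PySem.List.pyRange_one, PySem.List.pyRange_one]
  simp only [List.map_map, add_sub_cancel_left, sub_zero]
  apply List.map_congr_left
  intro k hk
  have hk' : (k : Int) < ncols := by
    have := List.mem_range.mp hk
    omega
  have hk0 : (0 : Int) ≤ (k : Int) := Int.natCast_nonneg k
  obtain ⟨hd, hm⟩ := pvDivMod (row := row) (col := (k : Int)) hc hk0 hk'
  simp only [Function.comp, zero_add, pvVDict, hd, hm]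

-- stage 1, all rows
theorem pvS1 {nrows ncols : Int} (hc : 0 < ncols) (m : Nat) (hm : (m : Int) ≤ nrows) :
    ((PySem.List.pyRange 0 (m : Int)).foldl (fun w row =>
      let up := PySem.Int.mod (row - 1) nrows * ncols
      let down := PySem.Int.mod (row + 1) nrows * ncols
      (PySem.List.pyRange 0 ncols).foldl (fun w col =>
        w.insert (row * ncols + col)
          ((PySem.Dict.empty.insert (up + col) 1).insert (down + col) 1)) w)
      (PySem.Dict.empty : PySem.Dict Int (PySem.Dict Int Int))).items
      = (PySem.List.pyRange 0 ((m : Int) * ncols)).map (fun i => (i, pvVDict nrows ncols i)) := by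
  induction m with
  | zero =>
    rw [show ((0 : Nat) : Int) = 0 from rfl, PySem.List.pyRange_one_eq_nil (le_refl 0),
      show ((0 : Int) * ncols) = 0 from by ring, PySem.List.pyRange_one_eq_nil (le_refl 0)]
    rfl
  | succ m ih =>
    have hm' : (m : Int) ≤ nrows := by push_cast at hm ⊢; omega
    have hcast : ((m + 1 : Nat) : Int) = (m : Int) + 1 := by push_cast; ring
    rw [hcast, PySem.List.pyRange_one_succ_right (Int.natCast_nonneg m), List.foldl_append,
      List.foldl_cons, List.foldl_nil]
    have := pvS1Row (nrows := nrows) hc (m : Int) (Int.natCast_nonneg m)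
      (by push_cast at hm; omega) _ (ih hm')
    simpa using this

-- one symmetric horizontal-edge step moves the bound from l to l + 1
theorem pvStep {nrows ncols l : Int} (hc : 0 < ncols)
    (hj : PySem.Int.mod l ncols < ncols - 1) (hl0 : 0 ≤ l) (hl1 : l + 1 < nrows * ncols)
    (W : PySem.Dict Int (PySem.Dict Int Int))
    (hW : W.items = (PySem.List.pyRange 0 (nrows * ncols)).map
      (fun i => (i, pvCellStage nrows ncols l i))) :
    ((W.modify l PySem.Dict.empty (fun d => d.insert (l + 1) 1)).modify (l + 1)
        PySem.Dict.empty (fun d => d.insert l 1)).items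
      = (PySem.List.pyRange 0 (nrows * ncols)).map
          (fun i => (i, pvCellStage nrows ncols (l + 1) i)) := by
  have hnd := PySem.List.nodup_pyRange_one 0 (nrows * ncols)
  have hlm : l ∈ PySem.List.pyRange 0 (nrows * ncols) :=
    PySem.List.mem_pyRange_one.mpr ⟨hl0, by omega⟩
  have hlm1 : l + 1 ∈ PySem.List.pyRange 0 (nrows * ncols) :=
    PySem.List.mem_pyRange_one.mpr ⟨by omega, hl1⟩
  have h1 := pvItemsModify hW hnd hlm (fun d => d.insert (l + 1) 1)
  have h2 := pvItemsModify h1 hnd hlm1 (fun d => d.insert l 1)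
  rw [h2]
  apply List.map_congr_left
  intro i hi
  obtain ⟨hi0, hi1⟩ := PySem.List.mem_pyRange_one.mp hi
  obtain ⟨hj0, hj1⟩ := pvModBounds (a := l) hc
  have hdecomp := PySem.Int.floordiv_mul_add_mod l ncols
  have hmod1 : PySem.Int.mod (l + 1) ncols = PySem.Int.mod l ncols + 1 := by
    have := (pvDivMod (ncols := ncols) (row := PySem.Int.floordiv l ncols)
      (col := PySem.Int.mod l ncols + 1) hc (by omega) (by omega)).2
    calc PySem.Int.mod (l + 1) ncols
        = PySem.Int.mod (PySem.Int.floordiv l ncols * ncols + (PySem.Int.mod l ncols + 1)) ncols := by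
          congr 1; omega
      _ = PySem.Int.mod l ncols + 1 := this
  refine congrArg (Prod.mk i) ?_
  by_cases hA : i = l + 1
  · subst hA
    rw [if_pos rfl, if_neg (show ¬ (l + 1 = l) by omega)]
    simp only [pvCellStage, hmod1, add_sub_cancel_right]
    split_ifs <;> first | rfl | (exfalso; omega)
  · rw [if_neg hA]
    by_cases hB : i = l
    · subst hB
      rw [if_pos rfl]
      simp only [pvCellStage]
      split_ifs <;> first | rfl | (exfalso; omega)
    · rw [if_neg hB]
      simp only [pvCellStage]
      split_ifs <;> first | rfl | (exfalso; omega)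

-- between the end of one row and the start of the next no edge is missed
theorem pvGap {nrows ncols r : Int} (hc : 0 < ncols) (hr : 0 ≤ r) (i : Int) :
    pvCellStage nrows ncols (r * ncols + (ncols - 1)) i
      = pvCellStage nrows ncols ((r + 1) * ncols) i := by
  have hb : (r + 1) * ncols = r * ncols + (ncols - 1) + 1 := by ring
  have hmz : PySem.Int.mod ((r + 1) * ncols) ncols = 0 := by
    have := (pvDivMod (ncols := ncols) (row := r + 1) (col := 0) hc (le_refl 0) hc).2
    simpa using this
  have hml : PySem.Int.mod (r * ncols + (ncols - 1)) ncols = ncols - 1 :=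
    (pvDivMod (ncols := ncols) (row := r) (col := ncols - 1) hc (by omega) (by omega)).2
  simp only [pvCellStage]
  by_cases hA : i = (r + 1) * ncols
  · subst hA
    split_ifs <;> first | rfl | (exfalso; omega)
  · by_cases hB : i = r * ncols + (ncols - 1)
    · subst hB
      split_ifs <;> first | rfl | (exfalso; omega)
    · split_ifs <;> first | rfl | (exfalso; omega)

-- stage 2, one row
theorem pvS2Row {nrows ncols r : Int} (hn : 0 < nrows) (hc : 0 < ncols)
    (hr1 : 0 ≤ r) (hr2 : r < nrows) (m : Nat) (hm : (m : Int) ≤ ncols - 1)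
    (W : PySem.Dict Int (PySem.Dict Int Int))
    (hW : W.items = (PySem.List.pyRange 0 (nrows * ncols)).map
      (fun i => (i, pvCellStage nrows ncols (r * ncols) i))) :
    ((PySem.List.pyRange 0 (m : Int)).foldl (fun w col =>
        let left := r * ncols + col
        let w := w.modify left PySem.Dict.empty (fun d => d.insert (left + 1) 1)
        w.modify (left + 1) PySem.Dict.empty (fun d => d.insert left 1)) W).items
      = (PySem.List.pyRange 0 (nrows * ncols)).map
          (fun i => (i, pvCellStage nrows ncols (r * ncols + (m : Int)) i)) := by
  induction m with
  | zero =>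
    rw [show ((0 : Nat) : Int) = 0 from rfl, PySem.List.pyRange_one_eq_nil (le_refl 0)]
    simpa using hW
  | succ m ih =>
    have hm' : (m : Int) ≤ ncols - 1 := by push_cast at hm ⊢; omega
    have hcast : ((m + 1 : Nat) : Int) = (m : Int) + 1 := by push_cast; ring
    rw [hcast, PySem.List.pyRange_one_succ_right (Int.natCast_nonneg m), List.foldl_append,
      List.foldl_cons, List.foldl_nil]
    have hmlt : (m : Int) < ncols - 1 := by push_cast at hm; omega
    have hmmod : PySem.Int.mod (r * ncols + (m : Int)) ncols = (m : Int) :=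
      (pvDivMod (ncols := ncols) (row := r) (col := (m : Int)) hc (Int.natCast_nonneg m)
        (by omega)).2
    have hup : (r + 1) * ncols ≤ nrows * ncols :=
      mul_le_mul_of_nonneg_right (by omega) (by omega)
    have hl1 : r * ncols + (m : Int) + 1 < nrows * ncols := by
      have : (r + 1) * ncols = r * ncols + ncols := by ring
      omega
    have hge : 0 ≤ r * ncols := mul_nonneg hr1 (by omega)
    have hstep := pvStep (nrows := nrows) hc (by rw [hmmod]; omega)
      (by have := Int.natCast_nonneg m; omega) hl1 _ (ih hm')
    simp only [] at hstep ⊢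
    rw [hstep]
    apply List.map_congr_left
    intro i _
    have e : r * ncols + (m : Int) + 1 = r * ncols + ((m : Int) + 1) := by ring
    rw [e]

-- stage 2, all rows
theorem pvS2 {nrows ncols : Int} (hn : 0 < nrows) (hc : 0 < ncols)
    (m : Nat) (hm : (m : Int) ≤ nrows)
    (W : PySem.Dict Int (PySem.Dict Int Int))
    (hW : W.items = (PySem.List.pyRange 0 (nrows * ncols)).map
      (fun i => (i, pvCellStage nrows ncols 0 i))) :
    ((PySem.List.pyRange 0 (m : Int)).foldl (fun w row =>
      (PySem.List.pyRange 0 (ncols - 1)).foldl (fun w col =>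
        let left := row * ncols + col
        let w := w.modify left PySem.Dict.empty (fun d => d.insert (left + 1) 1)
        w.modify (left + 1) PySem.Dict.empty (fun d => d.insert left 1)) w) W).items
      = (PySem.List.pyRange 0 (nrows * ncols)).map
          (fun i => (i, pvCellStage nrows ncols ((m : Int) * ncols) i)) := by
  induction m with
  | zero =>
    rw [show ((0 : Nat) : Int) = 0 from rfl, PySem.List.pyRange_one_eq_nil (le_refl 0)]
    rw [List.foldl_nil, hW]
    apply List.map_congr_left
    intro i _
    congr 2
    ring
  | succ m ih =>
    have hm' : (m : Int) ≤ nrows := by push_cast at hm ⊢; omega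
    have hcast : ((m + 1 : Nat) : Int) = (m : Int) + 1 := by push_cast; ring
    rw [hcast, PySem.List.pyRange_one_succ_right (Int.natCast_nonneg m), List.foldl_append,
      List.foldl_cons, List.foldl_nil]
    have hcc : (((ncols - 1).toNat : Int)) = ncols - 1 := Int.toNat_of_nonneg (by omega)
    have hrow := pvS2Row (nrows := nrows) hn hc (Int.natCast_nonneg m)
      (by push_cast at hm; omega) (ncols - 1).toNat (by rw [hcc]) _ (ih hm')
    rw [hcc] at hrow
    rw [hrow]
    apply List.map_congr_left
    intro i _
    rw [pvGap (nrows := nrows) (ncols := ncols) (r := (m : Int)) hc (Int.natCast_nonneg m) i]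

-- stage-1 state is the bound-0 stage-2 state
theorem pvStage0 {nrows ncols i : Int} (hc : 0 < ncols) (hi : 0 ≤ i) :
    pvCellStage nrows ncols 0 i = pvVDict nrows ncols i := by
  simp only [pvCellStage]
  by_cases h0 : i = 0
  · subst h0
    have hm0 : PySem.Int.mod (0 : Int) ncols = 0 := by
      have := (pvDivMod (ncols := ncols) (row := 0) (col := 0) hc (le_refl 0) hc).2
      simpa using this
    split_ifs <;> first | rfl | (exfalso; omega)
  · split_ifs <;> first | rfl | (exfalso; omega)

-- the fully-built cell matches the common description
theorem pvCellStageN_items {nrows ncols r c : Int} (hn : 0 < nrows) (hc : 0 < ncols)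
    (hr1 : 0 ≤ r) (hr2 : r < nrows) (h1 : 0 ≤ c) (h2 : c < ncols) :
    (pvCellStage nrows ncols (nrows * ncols) (r * ncols + c)).items = pvCellRC nrows ncols r c := by
  obtain ⟨hd, hm⟩ := pvDivMod (ncols := ncols) (row := r) (col := c) hc h1 h2
  have hup : (r + 1) * ncols ≤ nrows * ncols :=
    mul_le_mul_of_nonneg_right (by omega) (by omega)
  have hiN : r * ncols + c < nrows * ncols := by
    have : (r + 1) * ncols = r * ncols + ncols := by ring
    omega
  obtain ⟨hp1, hp2⟩ := pvModBounds (a := r - 1) hn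
  obtain ⟨hq1, hq2⟩ := pvModBounds (a := r + 1) hn
  have hv12 : 2 < nrows → PySem.Int.mod (r - 1) nrows * ncols + c ≠
      PySem.Int.mod (r + 1) nrows * ncols + c := by
    intro h3 he
    have := (pvKeyInj hc h1 h2 h1 h2 he).1
    have := (pvVert (row := r) hn).mp this.symm
    omega
  have hv1l : 0 < c → PySem.Int.mod (r - 1) nrows * ncols + c ≠ r * ncols + c - 1 := by
    intro hcl he
    have he' : PySem.Int.mod (r - 1) nrows * ncols + c = r * ncols + (c - 1) := by omega
    have := (pvKeyInj hc h1 h2 (by omega) (by omega) he').2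
    omega
  have hv1r : c < ncols - 1 → PySem.Int.mod (r - 1) nrows * ncols + c ≠ r * ncols + c + 1 := by
    intro hcr he
    have he' : PySem.Int.mod (r - 1) nrows * ncols + c = r * ncols + (c + 1) := by omega
    have := (pvKeyInj hc h1 h2 (by omega) (by omega) he').2
    omega
  have hv2l : 0 < c → PySem.Int.mod (r + 1) nrows * ncols + c ≠ r * ncols + c - 1 := by
    intro hcl he
    have he' : PySem.Int.mod (r + 1) nrows * ncols + c = r * ncols + (c - 1) := by omega
    have := (pvKeyInj hc h1 h2 (by omega) (by omega) he').2
    omega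
  have hv2r : c < ncols - 1 → PySem.Int.mod (r + 1) nrows * ncols + c ≠ r * ncols + c + 1 := by
    intro hcr he
    have he' : PySem.Int.mod (r + 1) nrows * ncols + c = r * ncols + (c + 1) := by omega
    have := (pvKeyInj hc h1 h2 (by omega) (by omega) he').2
    omega
  simp only [pvCellStage, pvVDict, hd, hm]
  have hvd : (PySem.Dict.empty.insert (PySem.Int.mod (r - 1) nrows * ncols + c) (1 : Int)).insert
      (PySem.Int.mod (r + 1) nrows * ncols + c) 1
      = if 2 < nrows then
          (PySem.Dict.empty.insert (PySem.Int.mod (r - 1) nrows * ncols + c) (1 : Int)).insert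
            (PySem.Int.mod (r + 1) nrows * ncols + c) 1
        else PySem.Dict.empty.insert (PySem.Int.mod (r - 1) nrows * ncols + c) (1 : Int) := by
    split_ifs with hA
    · rfl
    · have hv : PySem.Int.mod (r + 1) nrows = PySem.Int.mod (r - 1) nrows :=
        (pvVert hn).mpr (by omega)
      rw [hv, PySem.Dict.insert_insert_self]
  rw [show (if 0 < c ∧ r * ncols + c - 1 < nrows * ncols then
        ((PySem.Dict.empty.insert (PySem.Int.mod (r - 1) nrows * ncols + c) (1 : Int)).insert
          (PySem.Int.mod (r + 1) nrows * ncols + c) 1).insert (r * ncols + c - 1) 1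
      else (PySem.Dict.empty.insert (PySem.Int.mod (r - 1) nrows * ncols + c) (1 : Int)).insert
          (PySem.Int.mod (r + 1) nrows * ncols + c) 1)
      = (if 0 < c then
        ((PySem.Dict.empty.insert (PySem.Int.mod (r - 1) nrows * ncols + c) (1 : Int)).insert
          (PySem.Int.mod (r + 1) nrows * ncols + c) 1).insert (r * ncols + c - 1) 1
      else (PySem.Dict.empty.insert (PySem.Int.mod (r - 1) nrows * ncols + c) (1 : Int)).insert
          (PySem.Int.mod (r + 1) nrows * ncols + c) 1) from by
      split_ifs <;> first | rfl | (exfalso; omega)]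
  rw [show (if r * ncols + c < nrows * ncols ∧ c < ncols - 1 then
        ((if 0 < c then
        ((PySem.Dict.empty.insert (PySem.Int.mod (r - 1) nrows * ncols + c) (1 : Int)).insert
          (PySem.Int.mod (r + 1) nrows * ncols + c) 1).insert (r * ncols + c - 1) 1
      else ((PySem.Dict.empty.insert (PySem.Int.mod (r - 1) nrows * ncols + c) (1 : Int)).insert
          (PySem.Int.mod (r + 1) nrows * ncols + c) 1))).insert (r * ncols + c + 1) 1
      else (if 0 < c then
        ((PySem.Dict.empty.insert (PySem.Int.mod (r - 1) nrows * ncols + c) (1 : Int)).insert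
          (PySem.Int.mod (r + 1) nrows * ncols + c) 1).insert (r * ncols + c - 1) 1
      else ((PySem.Dict.empty.insert (PySem.Int.mod (r - 1) nrows * ncols + c) (1 : Int)).insert
          (PySem.Int.mod (r + 1) nrows * ncols + c) 1)))
      = (if c < ncols - 1 then
        ((if 0 < c then
        ((PySem.Dict.empty.insert (PySem.Int.mod (r - 1) nrows * ncols + c) (1 : Int)).insert
          (PySem.Int.mod (r + 1) nrows * ncols + c) 1).insert (r * ncols + c - 1) 1
      else ((PySem.Dict.empty.insert (PySem.Int.mod (r - 1) nrows * ncols + c) (1 : Int)).insert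
          (PySem.Int.mod (r + 1) nrows * ncols + c) 1))).insert (r * ncols + c + 1) 1
      else (if 0 < c then
        ((PySem.Dict.empty.insert (PySem.Int.mod (r - 1) nrows * ncols + c) (1 : Int)).insert
          (PySem.Int.mod (r + 1) nrows * ncols + c) 1).insert (r * ncols + c - 1) 1
      else ((PySem.Dict.empty.insert (PySem.Int.mod (r - 1) nrows * ncols + c) (1 : Int)).insert
          (PySem.Int.mod (r + 1) nrows * ncols + c) 1))) from by
      split_ifs <;> first | rfl | (exfalso; omega)]
  -- now reduce to an explicit fresh-key fold and reuse pvFoldKeys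
  by_cases hA : 2 < nrows
  · rw [hvd]
    simp only [if_pos hA]
    split_ifs with hcr hcl hcl
    · have hfk := pvFoldKeys [PySem.Int.mod (r - 1) nrows * ncols + c,
        PySem.Int.mod (r + 1) nrows * ncols + c, r * ncols + c - 1, r * ncols + c + 1]
        (by simp [hv12 hA, hv1l hcl, hv1r hcr, hv2l hcl, hv2r hcr]; omega)
      simp only [List.foldl_cons, List.foldl_nil] at hfk
      rw [hfk]; simp [pvCellRC, hA, hcl, hcr]
    · have hfk := pvFoldKeys [PySem.Int.mod (r - 1) nrows * ncols + c,
        PySem.Int.mod (r + 1) nrows * ncols + c, r * ncols + c + 1]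
        (by simp [hv12 hA, hv1r hcr, hv2r hcr])
      simp only [List.foldl_cons, List.foldl_nil] at hfk
      rw [hfk]; simp [pvCellRC, hA, hcl, hcr]
    · have hfk := pvFoldKeys [PySem.Int.mod (r - 1) nrows * ncols + c,
        PySem.Int.mod (r + 1) nrows * ncols + c, r * ncols + c - 1]
        (by simp [hv12 hA, hv1l hcl, hv2l hcl])
      simp only [List.foldl_cons, List.foldl_nil] at hfk
      rw [hfk]; simp [pvCellRC, hA, hcl, hcr]
    · have hfk := pvFoldKeys [PySem.Int.mod (r - 1) nrows * ncols + c,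
        PySem.Int.mod (r + 1) nrows * ncols + c] (by simp [hv12 hA])
      simp only [List.foldl_cons, List.foldl_nil] at hfk
      rw [hfk]; simp [pvCellRC, hA, hcl, hcr]
  · rw [hvd]
    simp only [if_neg hA]
    split_ifs with hcr hcl hcl
    · have hfk := pvFoldKeys [PySem.Int.mod (r - 1) nrows * ncols + c,
        r * ncols + c - 1, r * ncols + c + 1]
        (by simp [hv1l hcl, hv1r hcr]; omega)
      simp only [List.foldl_cons, List.foldl_nil] at hfk
      rw [hfk]; simp [pvCellRC, hA, hcl, hcr]
    · have hfk := pvFoldKeys [PySem.Int.mod (r - 1) nrows * ncols + c,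
        r * ncols + c + 1] (by simp [hv1r hcr])
      simp only [List.foldl_cons, List.foldl_nil] at hfk
      rw [hfk]; simp [pvCellRC, hA, hcl, hcr]
    · have hfk := pvFoldKeys [PySem.Int.mod (r - 1) nrows * ncols + c,
        r * ncols + c - 1] (by simp [hv1l hcl])
      simp only [List.foldl_cons, List.foldl_nil] at hfk
      rw [hfk]; simp [pvCellRC, hA, hcl, hcr]
    · have hfk := pvFoldKeys [PySem.Int.mod (r - 1) nrows * ncols + c] (by simp)
      simp only [List.foldl_cons, List.foldl_nil] at hfk
      rw [hfk]; simp [pvCellRC, hA, hcl, hcr]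

theorem pvB_eq {nrows ncols : Int} (hn : 0 < nrows) (hc : 0 < ncols) :
    create_custom_weight_matrix_alt nrows ncols
      = (PySem.List.pyRange 0 (nrows * ncols)).map (fun i => (i, pvCell nrows ncols i)) := by
  unfold create_custom_weight_matrix_alt
  have hs1 := pvS1 (nrows := nrows) (ncols := ncols) hc nrows.toNat
    (by rw [Int.toNat_of_nonneg hn.le])
  rw [Int.toNat_of_nonneg hn.le] at hs1
  have hs1' : ((PySem.List.pyRange 0 nrows).foldl (fun w row =>
      let up := PySem.Int.mod (row - 1) nrows * ncols
      let down := PySem.Int.mod (row + 1) nrows * ncols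
      (PySem.List.pyRange 0 ncols).foldl (fun w col =>
        w.insert (row * ncols + col)
          ((PySem.Dict.empty.insert (up + col) 1).insert (down + col) 1)) w)
      (PySem.Dict.empty : PySem.Dict Int (PySem.Dict Int Int))).items
      = (PySem.List.pyRange 0 (nrows * ncols)).map (fun i => (i, pvCellStage nrows ncols 0 i)) := by
    rw [hs1]
    apply List.map_congr_left
    intro i hi
    obtain ⟨hi0, _⟩ := PySem.List.mem_pyRange_one.mp hi
    rw [pvStage0 hc hi0]
  have hs2 := pvS2 (nrows := nrows) (ncols := ncols) hn hc nrows.toNat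
    (by rw [Int.toNat_of_nonneg hn.le]) _ hs1'
  rw [Int.toNat_of_nonneg hn.le] at hs2
  simp only []
  rw [hs2, List.map_map]
  apply List.map_congr_left
  intro i hi
  obtain ⟨hi0, hi1⟩ := PySem.List.mem_pyRange_one.mp hi
  obtain ⟨hC1, hC2⟩ := pvModBounds (a := i) hc
  have hR1 : 0 ≤ PySem.Int.floordiv i ncols := by
    rw [PySem.Int.le_floordiv_iff_mul_le hc]
    simpa using hi0
  have hR2 : PySem.Int.floordiv i ncols < nrows := by
    rw [PySem.Int.floordiv_lt_iff_lt_mul hc]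
    linarith [mul_comm nrows ncols]
  have hi' : i = PySem.Int.floordiv i ncols * ncols + PySem.Int.mod i ncols :=
    (PySem.Int.floordiv_mul_add_mod i ncols).symm
  simp only [Function.comp]
  rw [hi', pvCell_eq hc hC1 hC2,
    pvCellStageN_items (nrows := nrows) hn hc hR1 hR2 hC1 hC2]

-- ---- degenerate cases ----
theorem pvA_nil1 {nrows ncols : Int} (hn : nrows ≤ 0) :
    create_custom_weight_matrix nrows ncols = [] := by
  unfold create_custom_weight_matrix
  rw [PySem.List.pyRange_one_eq_nil hn]
  rfl

theorem pvA_nil2 {nrows ncols : Int} (hc : ncols ≤ 0) :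
    create_custom_weight_matrix nrows ncols = [] := by
  unfold create_custom_weight_matrix
  rw [PySem.List.pyRange_one_eq_nil hc]
  simp only [List.foldl_nil]
  rw [pvFoldlConst]
  rfl

theorem pvB_nil1 {nrows ncols : Int} (hn : nrows ≤ 0) :
    create_custom_weight_matrix_alt nrows ncols = [] := by
  unfold create_custom_weight_matrix_alt
  rw [PySem.List.pyRange_one_eq_nil hn]
  rfl

theorem pvB_nil2 {nrows ncols : Int} (hc : ncols ≤ 0) :
    create_custom_weight_matrix_alt nrows ncols = [] := by
  unfold create_custom_weight_matrix_alt
  rw [PySem.List.pyRange_one_eq_nil hc, PySem.List.pyRange_one_eq_nil (show ncols - 1 ≤ 0 by omega)]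
  simp only [List.foldl_nil]
  rw [pvFoldlConst, pvFoldlConst]
  rfl

theorem pv_main (nrows ncols : Int) :
    create_custom_weight_matrix nrows ncols = create_custom_weight_matrix_alt nrows ncols := by
  by_cases hn : 0 < nrows
  · by_cases hc : 0 < ncols
    · rw [pvA_eq hn hc, pvB_eq hn hc]
    · rw [pvA_nil2 (by omega), pvB_nil2 (by omega)]
  · rw [pvA_nil1 (by omega), pvB_nil1 (by omega)]

-- ===== VERDICT (by name: the statement is the Claim_ definition above) =====
theorem create_custom_weight_matrix_spec : Claim_equal_create_custom_weight_matrix := by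
  intro nrows ncols _
  unfold Spec_create_custom_weight_matrix
  exact pv_main nrows ncols
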